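-- pv_equiv track=rewrite | github.com/RenaSpb/core-problem-set-recursion | part-2.py | helper
-- ===== SOURCE A (Python) =====
-- def helper(n1, n2, count):
--     if n1 == 0 and n2 == 0:
--         return 1
--
--     if n1 == 0 or n2 == 0:
--         return count
--
--     if n1 % 10 == n2 % 10:
--         count += 1
--
--     return helper(n1 // 10, n2 // 10, count)
-- ===== SOURCE B (Python) =====
-- def helper(n1, n2, count):
--     while n1 != 0 and n2 != 0:
--         if n1 % 10 == n2 % 10:
--             count += 1
--         n1 //= 10
--         n2 //= 10
--     return 1 if n1 == 0 and n2 == 0 else count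
-- ===== Notes on version B (the rewrite author's own statement) =====
-- stated objective: idiomatic
-- what changed: Replaces the three-parameter tail recursion by an explicit while-loop with mutable state and a single final conditional return (1 if both counters reached zero together, else the accumulated count).
import Mathlib
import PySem

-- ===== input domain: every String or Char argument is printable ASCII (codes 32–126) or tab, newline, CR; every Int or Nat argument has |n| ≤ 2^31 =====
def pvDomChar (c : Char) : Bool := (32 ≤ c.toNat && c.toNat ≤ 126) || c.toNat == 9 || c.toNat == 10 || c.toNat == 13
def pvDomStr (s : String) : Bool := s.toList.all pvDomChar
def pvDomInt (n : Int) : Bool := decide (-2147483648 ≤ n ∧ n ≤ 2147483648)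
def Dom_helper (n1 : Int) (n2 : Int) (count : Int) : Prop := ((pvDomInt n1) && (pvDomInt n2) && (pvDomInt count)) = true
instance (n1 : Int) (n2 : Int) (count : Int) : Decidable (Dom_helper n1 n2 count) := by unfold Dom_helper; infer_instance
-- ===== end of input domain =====

-- B rewrites A's tail recursion as an explicit while-loop with a single final conditional return; same cost, plainer control flow.

-- ===== PORT A =====
-- Literal port of A's recursion. The `n1 < 0 ∧ n2 < 0` branch is only a totality
-- guard: there Python A recurses forever (RecursionError), outside Pre_helper.
def helper (n1 : Int) (n2 : Int) (count : Int) : Int :=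
  if n1 = 0 ∧ n2 = 0 then 1
  else if n1 = 0 ∨ n2 = 0 then count
  else if n1 < 0 ∧ n2 < 0 then count
  else
    helper (PySem.Int.floordiv n1 10) (PySem.Int.floordiv n2 10)
      (if PySem.Int.mod n1 10 = PySem.Int.mod n2 10 then count + 1 else count)
termination_by n1.toNat + n2.toNat
decreasing_by
  rw [PySem.Int.floordiv_eq_ediv_of_pos (by omega : (0:Int) < 10),
      PySem.Int.floordiv_eq_ediv_of_pos (by omega : (0:Int) < 10)]
  omega

-- ===== PORT B =====
-- The while-loop of Source B: iterate the state (n1, n2, count) until the loop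
-- condition fails. The `(0 ≤ n1 ∨ 0 ≤ n2)` conjunct is only a totality guard:
-- there the Python loop never exits (outside Pre_helper).
def helperAltLoop (n1 : Int) (n2 : Int) (count : Int) : Int × Int × Int :=
  if n1 ≠ 0 ∧ n2 ≠ 0 ∧ (0 ≤ n1 ∨ 0 ≤ n2) then
    helperAltLoop (PySem.Int.floordiv n1 10) (PySem.Int.floordiv n2 10)
      (if PySem.Int.mod n1 10 = PySem.Int.mod n2 10 then count + 1 else count)
  else (n1, n2, count)
termination_by n1.toNat + n2.toNat
decreasing_by
  rw [PySem.Int.floordiv_eq_ediv_of_pos (by omega : (0:Int) < 10),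
      PySem.Int.floordiv_eq_ediv_of_pos (by omega : (0:Int) < 10)]
  omega

def helper_alt (n1 : Int) (n2 : Int) (count : Int) : Int :=
  match helperAltLoop n1 n2 count with
  | (m1, m2, c) => if m1 = 0 ∧ m2 = 0 then 1 else c

-- ===== PRECONDITION & SPEC =====
-- Pre_ excludes exactly the inputs where Python A raises (RecursionError): both
-- arguments negative, so neither ever reaches 0 under floor division by 10.
def Pre_helper (n1 : Int) (n2 : Int) (count : Int) : Prop := 0 ≤ n1 ∨ 0 ≤ n2
instance (n1 : Int) (n2 : Int) (count : Int) : Decidable (Pre_helper n1 n2 count) := by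
  unfold Pre_helper; infer_instance

def pvWitness_helper : Int × Int × Int := (123, 153, 0)

def Spec_helper (n1 : Int) (n2 : Int) (count : Int) (out : Int) : Prop := out = helper_alt n1 n2 count
instance (n1 : Int) (n2 : Int) (count : Int) (out : Int) : Decidable (Spec_helper n1 n2 count out) := by
  unfold Spec_helper; infer_instance

-- ===== CLAIM (what is proved, stated in full; the proofs are below) =====
def Claim_equal_helper : Prop := ∀ (n1 : Int) (n2 : Int) (count : Int), Dom_helper n1 n2 count → Pre_helper n1 n2 count → Spec_helper n1 n2 count (helper n1 n2 count)

-- ===== LEMMAS AND PROOFS =====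
lemma helper_eq_alt (n1 n2 count : Int) : helper n1 n2 count = helper_alt n1 n2 count := by
  induction n1, n2, count using helper.induct with
  | case1 n1 n2 count h =>
      rw [helper, helper_alt, helperAltLoop]
      simp [h]
  | case2 n1 n2 count h h2 =>
      rw [helper, helper_alt, helperAltLoop]
      rcases h2 with h2 | h2 <;> simp_all
  | case3 n1 n2 count h h2 h3 =>
      have hc : ¬(n1 ≠ 0 ∧ n2 ≠ 0 ∧ (0 ≤ n1 ∨ 0 ≤ n2)) := by omega
      rw [helper, helper_alt, helperAltLoop, if_neg h, if_neg h2, if_pos h3, if_neg hc]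
      simp [h]
  | case4 n1 n2 count h h2 h3 ih =>
      have hc : n1 ≠ 0 ∧ n2 ≠ 0 ∧ (0 ≤ n1 ∨ 0 ≤ n2) := by omega
      rw [helper, helper_alt, helperAltLoop, if_neg h, if_neg h2, if_neg h3, if_pos hc]
      simp only [dite_eq_ite] at ih
      rw [ih, helper_alt]

-- ===== VERDICT (by name: the statement is the Claim_ definition above) =====
theorem helper_spec : Claim_equal_helper := by
  intro n1 n2 count _ _
  exact helper_eq_alt n1 n2 count
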